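-- pv_equiv track=rewrite | github.com/seongwon02/algorithm | 프로그래머스/2/340212. ［PCCP 기출문제］ 2번 ／ 퍼즐 게임 챌린지/［PCCP 기출문제］ 2번 ／ 퍼즐 게임 챌린지.py | solution
-- ===== SOURCE A (Python) =====
-- def solution(diffs, times, limit):
--     answer = float("inf")
--     lo, hi = min(diffs), max(diffs)
--
--     while lo <= hi:
--         mid = (lo+hi) // 2
--
--         t = 0
--         for i in range(len(diffs)):
--             if diffs[i] <= mid:
--                 t += times[i]
--             else:
--                 t += (times[i-1]+times[i]) * (diffs[i] - mid) + times[i]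
--
--         if t <= limit:
--             answer = min(answer, mid)
--             hi = mid - 1
--         else:
--             lo = mid + 1
--
--     return answer
-- ===== SOURCE B (Python) =====
-- def solution(diffs, times, limit):
--     # Sort the puzzles once by difficulty (descending) and answer each
--     # feasibility query of the binary search in O(log n) via prefix sums,
--     # instead of re-scanning every puzzle per query.
--     n = len(diffs)
--     total = 0
--     for i in range(n):
--         total += times[i]
--     pairs = sorted(((diffs[i], times[i - 1] + times[i]) for i in range(n)),
--                    key=lambda p: -p[0])  # descending by difficulty
--     ds = [p[0] for p in pairs]
--     pc = _prefix([p[1] for p in pairs])            # prefix sums of c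
--     pcd = _prefix([p[0] * p[1] for p in pairs])    # prefix sums of c*d
--     answer = float("inf")
--     lo, hi = min(diffs), max(diffs)
--     while lo <= hi:
--         mid = (lo + hi) // 2
--         k = _count_gt(ds, mid)                     # how many d's exceed mid
--         t = total + pcd[k] - mid * pc[k]
--         if t <= limit:
--             answer = mid if answer == float("inf") else min(answer, mid)
--             hi = mid - 1
--         else:
--             lo = mid + 1
--     return answer
--
--
-- def _prefix(vals):
--     out = [0]
--     s = 0
--     for v in vals:
--         s += v
--         out.append(s)
--     return out
--
--
-- def _count_gt(ds, mid):
--     # ds is non-increasing; count of entries > mid by binary search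
--     lo, hi = 0, len(ds)
--     while lo < hi:
--         m = (lo + hi) // 2
--         if ds[m] > mid:
--             lo = m + 1
--         else:
--             hi = m
--     return lo
-- ===== Notes on version B (the rewrite author's own statement) =====
-- stated objective: faster
-- what changed: B sorts the puzzles once by difficulty and precomputes prefix sums of the per-puzzle penalty coefficients, so each feasibility probe of the binary search over levels costs O(log n) (count of harder puzzles by binary search + two prefix-sum lookups) instead of A's O(n) rescan of all puzzles.
-- outside the precondition, e.g. on solution([1, 2], [-5, 3], -3): A returns 1, B returns 1
import Mathlib
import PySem

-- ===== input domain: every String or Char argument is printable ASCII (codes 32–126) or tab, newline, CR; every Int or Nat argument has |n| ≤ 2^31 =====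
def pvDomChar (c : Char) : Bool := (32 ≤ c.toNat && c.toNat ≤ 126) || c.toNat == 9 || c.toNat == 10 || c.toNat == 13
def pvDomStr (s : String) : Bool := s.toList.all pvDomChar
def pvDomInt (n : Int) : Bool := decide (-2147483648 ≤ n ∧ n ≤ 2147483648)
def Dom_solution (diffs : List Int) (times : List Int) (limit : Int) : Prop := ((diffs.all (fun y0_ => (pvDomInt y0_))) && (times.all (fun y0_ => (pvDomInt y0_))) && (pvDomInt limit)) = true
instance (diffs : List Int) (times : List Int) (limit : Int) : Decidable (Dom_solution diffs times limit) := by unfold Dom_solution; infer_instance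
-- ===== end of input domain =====

-- B replaces A's O(n) rescan of all puzzles per binary-search probe by a one-off sort
-- plus prefix sums, answering each probe with a binary search over difficulties.

-- ===== PORT A =====

-- A's inner 'for i in range(len(diffs))' loop computing the total time at level mid.
-- xs[i] is ported as pyGetD (in range under Pre_solution; times[i-1] at i = 0 is Python's
-- wrap-around times[-1], which pyGetD reproduces for -1).
def tA (diffs times : List Int) (mid : Int) : Int :=
  (PySem.List.pyRange 0 (PySem.List.len diffs) 1).foldl (fun t i =>
    if PySem.List.pyGetD diffs i 0 ≤ mid then
      t + PySem.List.pyGetD times i 0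
    else
      t + (PySem.List.pyGetD times (i - 1) 0 + PySem.List.pyGetD times i 0)
            * (PySem.List.pyGetD diffs i 0 - mid) + PySem.List.pyGetD times i 0) 0

-- A's 'while lo <= hi' binary search; answer = none plays float('inf').
def searchA (diffs times : List Int) (limit lo hi : Int) (answer : Option Int) : Option Int :=
  if h : lo ≤ hi then
    let mid := PySem.Int.floordiv (lo + hi) 2
    if tA diffs times mid ≤ limit then
      searchA diffs times limit lo (mid - 1)
        (some (match answer with | none => mid | some a => min a mid))
    else
      searchA diffs times limit (mid + 1) hi answer
  else answer
termination_by (hi + 1 - lo).toNat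
decreasing_by
  all_goals
    have hb := PySem.Int.floordiv_two_mid_bounds h
    omega

def solution (diffs : List Int) (times : List Int) (limit : Int) : Int :=
  -- min(diffs)/max(diffs): ValueError on [] is excluded by Pre_solution
  match searchA diffs times limit ((PySem.List.min? diffs (fun x => x)).getD 0)
      ((PySem.List.max? diffs (fun x => x)).getD 0) none with
  | some a => a
  | none => 0  -- Python returns float('inf') here (not an int); excluded by Pre_solution

-- ===== PORT B =====

-- Source B's _prefix: running prefix sums, starting with 0.
def prefixSums (vals : List Int) : List Int :=
  (vals.foldl (fun (st : List Int × Int) v => (st.1 ++ [st.2 + v], st.2 + v)) ([0], 0)).1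

-- Source B's _count_gt: binary search counting leading entries > mid of a non-increasing list.
def countGt (ds : List Int) (mid lo hi : Int) : Int :=
  if h : lo < hi then
    let m := PySem.Int.floordiv (lo + hi) 2
    if PySem.List.pyGetD ds m 0 > mid then countGt ds mid (m + 1) hi
    else countGt ds mid lo m
  else lo
termination_by (hi - lo).toNat
decreasing_by
  all_goals
    have hb := PySem.Int.floordiv_two_mid_bounds (le_of_lt h)
    have hlt : PySem.Int.floordiv (lo + hi) 2 < hi :=
      (PySem.Int.floordiv_lt_iff_lt_mul (by omega)).mpr (by omega)
    omega

-- Source B's 'while lo <= hi' loop over levels with O(log n) feasibility probes.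
def searchB (total : Int) (ds pc pcd : List Int) (limit lo hi : Int) (answer : Option Int) : Option Int :=
  if h : lo ≤ hi then
    let mid := PySem.Int.floordiv (lo + hi) 2
    let k := countGt ds mid 0 (PySem.List.len ds)
    if total + PySem.List.pyGetD pcd k 0 - mid * PySem.List.pyGetD pc k 0 ≤ limit then
      searchB total ds pc pcd limit lo (mid - 1)
        (some (match answer with | none => mid | some a => min a mid))
    else
      searchB total ds pc pcd limit (mid + 1) hi answer
  else answer
termination_by (hi + 1 - lo).toNat
decreasing_by
  all_goals
    have hb := PySem.Int.floordiv_two_mid_bounds h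
    omega

def solution_alt (diffs : List Int) (times : List Int) (limit : Int) : Int :=
  let n := PySem.List.len diffs
  let total := (PySem.List.pyRange 0 n 1).foldl (fun s i => s + PySem.List.pyGetD times i 0) 0
  let pairs := PySem.List.sorted
    ((PySem.List.pyRange 0 n 1).map (fun i =>
      (PySem.List.pyGetD diffs i 0,
       PySem.List.pyGetD times (i - 1) 0 + PySem.List.pyGetD times i 0)))
    (fun p => -p.1) false
  let ds := pairs.map (fun p => p.1)
  let pc := prefixSums (pairs.map (fun p => p.2))
  let pcd := prefixSums (pairs.map (fun p => p.1 * p.2))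
  match searchB total ds pc pcd limit ((PySem.List.min? diffs (fun x => x)).getD 0)
      ((PySem.List.max? diffs (fun x => x)).getD 0) none with
  | some a => a
  | none => 0  -- Python returns float('inf') here (not an int); excluded by Pre_solution

-- ===== PRECONDITION & SPEC =====

-- Pre_ excludes: empty diffs (min/max raise ValueError), times shorter than diffs
-- (IndexError), and inputs whose total time sum(times[:len(diffs)]) exceeds limit, on
-- which A can return float('inf') — not an int; this simple closed form also excludes
-- some negative-time inputs where A happens to return an int, which B matches (see cite).
def Pre_solution (diffs : List Int) (times : List Int) (limit : Int) : Prop :=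
  diffs ≠ [] ∧ diffs.length ≤ times.length ∧ (times.take diffs.length).sum ≤ limit

instance (diffs : List Int) (times : List Int) (limit : Int) : Decidable (Pre_solution diffs times limit) := by
  unfold Pre_solution; infer_instance

def pvWitness_solution : List Int × List Int × Int := ([3, 1, 2], [5, 2, 4], 30)

def Spec_solution (diffs : List Int) (times : List Int) (limit : Int) (out : Int) : Prop := out = solution_alt diffs times limit
instance (diffs : List Int) (times : List Int) (limit : Int) (out : Int) : Decidable (Spec_solution diffs times limit out) := by unfold Spec_solution; infer_instance

-- ===== CLAIM (what is proved, stated in full; the proofs are below) =====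
def Claim_equal_solution : Prop := ∀ (diffs : List Int) (times : List Int) (limit : Int), Dom_solution diffs times limit → Pre_solution diffs times limit → Spec_solution diffs times limit (solution diffs times limit)

-- ===== LEMMAS AND PROOFS =====

-- prefixSums characterised by a simple structural recursion
def psum : List Int → Int → List Int
  | [], s => [s]
  | v :: vs, s => s :: psum vs (s + v)

theorem prefixSums_foldl (vals : List Int) (acc : List Int) (s : Int) :
    (vals.foldl (fun (st : List Int × Int) v => (st.1 ++ [st.2 + v], st.2 + v)) (acc ++ [s], s)).1
      = acc ++ psum vals s := by
  induction vals generalizing acc s with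
  | nil => simp [psum]
  | cons v vs ih =>
      simp only [List.foldl_cons]
      have h := ih (acc ++ [s]) (s + v)
      simpa [psum] using h

theorem prefixSums_eq_psum (vals : List Int) : prefixSums vals = psum vals 0 := by
  have h := prefixSums_foldl vals [] 0
  simpa [prefixSums] using h

theorem psum_getD (vals : List Int) (s : Int) (k : Nat) (hk : k ≤ vals.length) :
    (psum vals s).getD k 0 = s + (vals.take k).sum := by
  induction vals generalizing s k with
  | nil =>
      have hk0 : k = 0 := by simpa using hk
      subst hk0; simp [psum]
  | cons v vs ih =>
      cases k with
      | zero => simp [psum]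
      | succ k =>
          simp only [psum, List.getD_cons_succ, List.take_succ_cons, List.sum_cons]
          rw [ih (s + v) k (by simpa using hk)]
          ring

-- Σ f - mid·Σ g over the same list, fused
theorem sum_map_sub_mul (l : List (Int × Int)) (mid : Int) :
    (l.map (fun p => p.1 * p.2)).sum - mid * (l.map (fun p => p.2)).sum
      = (l.map (fun p => p.1 * p.2 - mid * p.2)).sum := by
  induction l with
  | nil => simp
  | cons p t ih =>
      simp only [List.map_cons, List.sum_cons]
      rw [← ih]
      ring

-- a filtered sum as a sum of if-terms over the whole list
theorem sum_filter_eq_sum_ite {α : Type} (l : List α) (p : α → Bool) (f : α → Int) :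
    ((l.filter p).map f).sum = (l.map (fun x => if p x then f x else 0)).sum := by
  induction l with
  | nil => simp
  | cons x t ih => by_cases hx : p x <;> simp [hx, ih]

-- on a key-nonincreasing list, the elements with key > mid form the prefix of length countP
theorem filter_eq_take {α : Type} (l : List α) (key : α → Int) (mid : Int)
    (h : l.Pairwise (fun a b => key b ≤ key a)) :
    l.filter (fun x => decide (mid < key x)) = l.take (l.countP (fun x => decide (mid < key x))) := by
  induction l with
  | nil => simp
  | cons x t ih =>
      rcases List.pairwise_cons.mp h with ⟨hx, ht⟩
      by_cases hmx : mid < key x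
      · simp [hmx, ih ht]
      · have hzero : t.countP (fun y => decide (mid < key y)) = 0 := by
          refine List.countP_eq_zero.mpr ?_
          intro y hy
          simp only [decide_eq_true_eq]
          exact fun hlt => hmx (lt_of_lt_of_le hlt (hx y hy))
        have hfil : t.filter (fun y => decide (mid < key y)) = [] := by
          refine List.filter_eq_nil_iff.mpr ?_
          intro y hy
          simp only [decide_eq_true_eq]
          exact fun hlt => hmx (lt_of_lt_of_le hlt (hx y hy))
        simp [hmx, hzero, hfil]

-- pointwise reading of filter_eq_take: index j carries key > mid iff j < countP
theorem lt_key_iff_lt_countP {α : Type} (l : List α) (key : α → Int) (mid : Int)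
    (h : l.Pairwise (fun a b => key b ≤ key a)) (j : Nat) (hj : j < l.length) :
    mid < key (l[j]'hj) ↔ j < l.countP (fun x => decide (mid < key x)) := by
  set p : α → Bool := fun x => decide (mid < key x) with hp
  have hK : l.countP p ≤ l.length := List.countP_le_length
  have hft := filter_eq_take l key mid h
  constructor
  · intro hlt
    by_contra hge
    -- l[j] lies in the dropped part, where nothing satisfies p
    have hcount : (l.take (l.countP p)).countP p + (l.drop (l.countP p)).countP p = l.countP p := by
      rw [← List.countP_append, List.take_append_drop]
    have htake : (l.take (l.countP p)).countP p = l.countP p := by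
      rw [← hft]
      have hall : ∀ a ∈ l.filter p, p a := fun a ha => List.of_mem_filter ha
      rw [List.countP_eq_length.mpr hall, List.countP_eq_length_filter]
    have hdrop : (l.drop (l.countP p)).countP p = 0 := by omega
    have hmem : l[j]'hj ∈ l.drop (l.countP p) := by
      have : l[j]'hj = (l.drop (l.countP p))[j - l.countP p]'(by rw [List.length_drop]; omega) := by
        rw [List.getElem_drop]
        congr 1
        omega
      rw [this]
      exact List.getElem_mem _
    have := List.countP_eq_zero.mp hdrop _ hmem
    simp [hp] at this
    exact absurd hlt (not_lt.mpr this)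
  · intro hjK
    have hjt : (l.take (l.countP p))[j]'(by simp; omega) = l[j]'hj := List.getElem_take
    have hmem : l[j]'hj ∈ l.filter p := by
      rw [hft, ← hjt]
      exact List.getElem_mem _
    have := List.of_mem_filter hmem
    simpa [hp] using this

-- the hand-rolled binary search returns countP on a list whose > mid entries are a prefix
theorem countGt_eq (ds : List Int) (mid : Int) (K : Nat)
    (hiff : ∀ (j : Nat) (hj : j < ds.length), mid < ds[j]'hj ↔ j < K) :
    ∀ (lo hi : Int), 0 ≤ lo → lo ≤ (K : Int) → (K : Int) ≤ hi → hi ≤ (ds.length : Int) →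
      countGt ds mid lo hi = K := by
  intro lo hi
  fun_induction countGt ds mid lo hi with
  | case1 lo hi h m hgt ih =>
      intro h0 hloK hKhi hhil
      have hb := PySem.Int.floordiv_two_mid_bounds (le_of_lt h)
      have hmhi : m < hi := (PySem.Int.floordiv_lt_iff_lt_mul (by omega)).mpr (by omega)
      have hmlen : m.toNat < ds.length := by omega
      have hget := PySem.List.pyGetD_eq_getElem (xs := ds) (i := m) (d := 0) (by omega) (by omega)
      rw [hget] at hgt
      have hmK : m.toNat < K := (hiff m.toNat hmlen).mp hgt
      exact ih (by omega) (by omega) hKhi hhil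
  | case2 lo hi h m hgt ih =>
      intro h0 hloK hKhi hhil
      have hb := PySem.Int.floordiv_two_mid_bounds (le_of_lt h)
      have hmhi : m < hi := (PySem.Int.floordiv_lt_iff_lt_mul (by omega)).mpr (by omega)
      have hmlen : m.toNat < ds.length := by omega
      have hget := PySem.List.pyGetD_eq_getElem (xs := ds) (i := m) (d := 0) (by omega) (by omega)
      rw [hget] at hgt
      have hmK : ¬ m.toNat < K := fun hk => hgt ((hiff m.toNat hmlen).mpr hk)
      exact ih h0 hloK (by omega) (by omega)
  | case3 lo hi h =>
      intro h0 hloK hKhi hhil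
      omega

-- canonical form of B's pair list
def pairList (diffs times : List Int) : List (Int × Int) :=
  (List.range diffs.length).map (fun (k : Nat) =>
    (PySem.List.pyGetD diffs (↑k) 0,
     PySem.List.pyGetD times ((↑k : Int) - 1) 0 + PySem.List.pyGetD times (↑k) 0))

def sortedPairs (diffs times : List Int) : List (Int × Int) :=
  PySem.List.sorted (pairList diffs times) (fun p => -p.1) false

-- A's inner loop as a closed sum
theorem tA_eq_sum (diffs times : List Int) (mid : Int) :
    tA diffs times mid
      = ((List.range diffs.length).map (fun (k : Nat) => PySem.List.pyGetD times (↑k) 0)).sum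
        + ((List.range diffs.length).map (fun (k : Nat) =>
            if mid < PySem.List.pyGetD diffs (↑k) 0 then
              PySem.List.pyGetD diffs (↑k) 0
                  * (PySem.List.pyGetD times ((↑k : Int) - 1) 0 + PySem.List.pyGetD times (↑k) 0)
                - mid * (PySem.List.pyGetD times ((↑k : Int) - 1) 0 + PySem.List.pyGetD times (↑k) 0)
            else 0)).sum := by
  unfold tA
  simp only [PySem.List.len_eq, PySem.List.pyRange_zero_natCast, List.foldl_map]
  have hext : ∀ (t : Int) (k : Nat),
      (if PySem.List.pyGetD diffs (↑k) 0 ≤ mid then t + PySem.List.pyGetD times (↑k) 0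
       else t + (PySem.List.pyGetD times ((↑k : Int) - 1) 0 + PySem.List.pyGetD times (↑k) 0)
              * (PySem.List.pyGetD diffs (↑k) 0 - mid) + PySem.List.pyGetD times (↑k) 0)
      = t + (PySem.List.pyGetD times (↑k) 0 +
          (if mid < PySem.List.pyGetD diffs (↑k) 0 then
            PySem.List.pyGetD diffs (↑k) 0
                * (PySem.List.pyGetD times ((↑k : Int) - 1) 0 + PySem.List.pyGetD times (↑k) 0)
              - mid * (PySem.List.pyGetD times ((↑k : Int) - 1) 0 + PySem.List.pyGetD times (↑k) 0)
          else 0)) := by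
    intro t k
    by_cases hd : PySem.List.pyGetD diffs (↑k) 0 ≤ mid
    · simp only [if_pos hd, if_neg (not_lt.mpr hd), add_zero]
    · simp only [if_neg hd, if_pos (not_le.mp hd)]
      ring
  rw [List.foldl_ext _ _ 0 (fun t k _ => hext t k), PySem.List.foldl_add,
    PySem.List.sum_map_add_int, zero_add]

-- B's probe (prefix sums + binary search) computes A's inner loop, for every level
theorem tB_eq (diffs times : List Int) (mid : Int) :
    ((List.range diffs.length).map (fun (k : Nat) => PySem.List.pyGetD times (↑k) 0)).sum
      + PySem.List.pyGetD (prefixSums ((sortedPairs diffs times).map (fun p => p.1 * p.2)))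
          (countGt ((sortedPairs diffs times).map (fun p => p.1)) mid 0
            (PySem.List.len ((sortedPairs diffs times).map (fun p => p.1)))) 0
      - mid * PySem.List.pyGetD (prefixSums ((sortedPairs diffs times).map (fun p => p.2)))
          (countGt ((sortedPairs diffs times).map (fun p => p.1)) mid 0
            (PySem.List.len ((sortedPairs diffs times).map (fun p => p.1)))) 0
    = tA diffs times mid := by
  set P := sortedPairs diffs times with hPdef
  set ds := P.map (fun p => p.1) with hdsdef
  have hpw : P.Pairwise (fun a b => b.1 ≤ a.1) := by
    have h := PySem.List.sorted_pairwise (pairList diffs times) (fun p : Int × Int => -p.1)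
    exact h.imp (fun hab => by omega)
  have hdsp : ds.Pairwise (fun a b => b ≤ a) := by
    rw [hdsdef]
    exact List.Pairwise.map (fun (p : Int × Int) => p.1) (fun a b hab => hab) hpw
  set K := ds.countP (fun d => decide (mid < d)) with hKdef
  have hKlen : K ≤ ds.length := List.countP_le_length
  have hPds : ds.length = P.length := by rw [hdsdef, List.length_map]
  have hiff : ∀ (j : Nat) (hj : j < ds.length), mid < ds[j]'hj ↔ j < K := by
    intro j hj
    simpa using lt_key_iff_lt_countP ds (fun x => x) mid (by simpa using hdsp) j hj
  have hcg : countGt ds mid 0 (PySem.List.len ds) = (K : Int) := by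
    rw [PySem.List.len_eq]
    exact countGt_eq ds mid K hiff 0 _ le_rfl (by omega) (by exact_mod_cast hKlen) le_rfl
  have hpcd : PySem.List.pyGetD (prefixSums (P.map (fun p => p.1 * p.2))) ((K : Int)) 0
      = ((P.take K).map (fun p => p.1 * p.2)).sum := by
    rw [prefixSums_eq_psum, PySem.List.pyGetD_natCast]
    rw [psum_getD _ _ K (by rw [List.length_map]; omega), zero_add, List.map_take]
  have hpc : PySem.List.pyGetD (prefixSums (P.map (fun p => p.2))) ((K : Int)) 0
      = ((P.take K).map (fun p => p.2)).sum := by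
    rw [prefixSums_eq_psum, PySem.List.pyGetD_natCast]
    rw [psum_getD _ _ K (by rw [List.length_map]; omega), zero_add, List.map_take]
  have hKP : K = P.countP (fun p => decide (mid < p.1)) := by
    rw [hKdef, hdsdef, List.countP_map]
    rfl
  have htake : P.take K = P.filter (fun p => decide (mid < p.1)) := by
    rw [filter_eq_take P (fun p => p.1) mid hpw, ← hKP]
  have hperm : P.Perm (pairList diffs times) := PySem.List.sorted_perm _ _ _
  rw [hcg, hpcd, hpc, tA_eq_sum]
  have hfused := sum_map_sub_mul (P.take K) mid
  have hchain : ((P.take K).map (fun p => p.1 * p.2)).sum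
        - mid * ((P.take K).map (fun p => p.2)).sum
      = ((List.range diffs.length).map (fun (k : Nat) =>
          if mid < PySem.List.pyGetD diffs (↑k) 0 then
            PySem.List.pyGetD diffs (↑k) 0
                * (PySem.List.pyGetD times ((↑k : Int) - 1) 0 + PySem.List.pyGetD times (↑k) 0)
              - mid * (PySem.List.pyGetD times ((↑k : Int) - 1) 0 + PySem.List.pyGetD times (↑k) 0)
          else 0)).sum := by
    rw [hfused, htake, sum_filter_eq_sum_ite]
    simp only [decide_eq_true_eq]
    rw [((hperm.map (fun p => if mid < p.1 then p.1 * p.2 - mid * p.2 else 0)).sum_eq)]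
    simp only [pairList, List.map_map]
    rfl
  linarith [hchain]

-- the two identically-shaped binary searches agree once their probes agree
theorem search_eq (diffs times : List Int) (limit total : Int) (ds pc pcd : List Int)
    (hp : ∀ mid : Int,
      total + PySem.List.pyGetD pcd (countGt ds mid 0 (PySem.List.len ds)) 0
        - mid * PySem.List.pyGetD pc (countGt ds mid 0 (PySem.List.len ds)) 0
      = tA diffs times mid) :
    ∀ (lo hi : Int) (ans : Option Int),
      searchB total ds pc pcd limit lo hi ans = searchA diffs times limit lo hi ans := by
  intro lo hi ans
  fun_induction searchB total ds pc pcd limit lo hi ans with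
  | case1 lo hi ans h mid k hle ih =>
      rw [searchA]
      rw [dif_pos h, if_pos (by rw [← hp]; exact hle), ih]
  | case2 lo hi ans h mid k hle ih =>
      rw [searchA]
      rw [dif_pos h, if_neg (by rw [← hp]; exact hle), ih]
  | case3 lo hi ans h =>
      rw [searchA, dif_neg h]

theorem sol_eq (diffs times : List Int) (limit : Int) :
    solution diffs times limit = solution_alt diffs times limit := by
  have hpairs : PySem.List.sorted
      ((PySem.List.pyRange 0 (PySem.List.len diffs) 1).map (fun i =>
        (PySem.List.pyGetD diffs i 0,
         PySem.List.pyGetD times (i - 1) 0 + PySem.List.pyGetD times i 0)))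
      (fun p => -p.1) false = sortedPairs diffs times := by
    unfold sortedPairs pairList
    congr 1
    simp only [PySem.List.len_eq, PySem.List.pyRange_zero_natCast, List.map_map]
    rfl
  have htotal : (PySem.List.pyRange 0 (PySem.List.len diffs) 1).foldl
      (fun s i => s + PySem.List.pyGetD times i 0) 0
      = ((List.range diffs.length).map (fun (k : Nat) => PySem.List.pyGetD times (↑k) 0)).sum := by
    simp only [PySem.List.len_eq, PySem.List.pyRange_zero_natCast, List.foldl_map]
    rw [PySem.List.foldl_add, zero_add]
  simp only [solution, solution_alt]
  rw [hpairs, htotal]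
  rw [search_eq diffs times limit _ _ _ _ (fun mid => tB_eq diffs times mid)]

-- ===== VERDICT (by name: the statement is the Claim_ definition above) =====
theorem solution_spec : Claim_equal_solution := by
  intro diffs times limit _hdom _hpre
  show solution diffs times limit = solution_alt diffs times limit
  exact sol_eq diffs times limit
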